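-- pv_equiv track=rewrite | github.com/stridskoma2/ts-api-wrapper | src/tradestation_api_wrapper/stream.py | _looks_incomplete
-- ===== SOURCE A (Python) =====
-- def _looks_incomplete(buffer: str) -> bool:
--     stack: list[str] = []
--     in_string = False
--     escaped = False
--     for char in buffer:
--         if escaped:
--             escaped = False
--             continue
--         if char == "\\":
--             escaped = True
--             continue
--         if char == '"':
--             in_string = not in_string
--             continue
--         if in_string:
--             continue
--         if char in "{[":
--             stack.append(char)
--         elif char == "}":
--             if not stack or stack.pop() != "{":
--                 return False
--         elif char == "]":
--             if not stack or stack.pop() != "[":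
--                 return False
--     return in_string or bool(stack)
-- ===== SOURCE B (Python) =====
-- def _looks_incomplete(buffer: str) -> bool:
--     # Pass 1: string/escape state machine only; keep the unmatched-relevant
--     # bracket characters that occur outside strings and are not escaped.
--     brackets = []
--     in_string = False
--     escaped = False
--     for char in buffer:
--         if escaped:
--             escaped = False
--         elif char == "\\":
--             escaped = True
--         elif char == '"':
--             in_string = not in_string
--         elif not in_string and char in "{[}]":
--             brackets.append(char)
--     # Pass 2: plain stack matcher over the bracket list.
--     stack = []
--     for b in brackets:
--         if b in "{[":
--             stack.append(b)
--         elif not stack or stack.pop() != ("{" if b == "}" else "["):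
--             return False
--     return in_string or bool(stack)
-- ===== Notes on version B (the rewrite author's own statement) =====
-- stated objective: alternative
-- what changed: Splits A's single merged loop into two phases: a first pass running only the escape/quote state machine and collecting unescaped out-of-string bracket characters, then a separate stack matcher over that bracket list.
import Mathlib
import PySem

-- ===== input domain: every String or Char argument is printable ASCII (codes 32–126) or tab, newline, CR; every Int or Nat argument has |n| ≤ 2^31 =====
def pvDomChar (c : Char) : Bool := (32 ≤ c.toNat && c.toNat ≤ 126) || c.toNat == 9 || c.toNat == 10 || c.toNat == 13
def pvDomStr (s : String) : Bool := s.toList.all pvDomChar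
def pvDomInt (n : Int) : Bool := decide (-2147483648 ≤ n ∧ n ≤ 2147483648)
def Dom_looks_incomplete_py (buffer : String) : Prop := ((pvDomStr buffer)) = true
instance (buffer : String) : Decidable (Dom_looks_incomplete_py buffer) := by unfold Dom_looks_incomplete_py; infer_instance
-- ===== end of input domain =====

-- B splits A's single loop into a string-filter pass followed by a stack matcher (alternative decomposition, same cost).
-- ===== PORT A =====
def pvALoop : List Char → List Char → Bool → Bool → Bool
  | [], stack, ins, _ => ins || !stack.isEmpty
  | c :: rest, stack, ins, esc =>
    if esc then pvALoop rest stack ins false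
    else if c = '\\' then pvALoop rest stack ins true
    else if c = '"' then pvALoop rest stack (!ins) esc
    else if ins then pvALoop rest stack ins esc
    else if c = '{' ∨ c = '[' then pvALoop rest (c :: stack) ins esc
    else if c = '}' then
      match stack with
      | [] => false
      | t :: stack' => if t ≠ '{' then false else pvALoop rest stack' ins esc
    else if c = ']' then
      match stack with
      | [] => false
      | t :: stack' => if t ≠ '[' then false else pvALoop rest stack' ins esc
    else pvALoop rest stack ins esc

def looks_incomplete_py (buffer : String) : Bool :=
  pvALoop buffer.toList [] false false

-- ===== PORT B =====
-- Pass 1: escape/quote state machine; collects unescaped out-of-string bracket chars and the final in_string flag.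
def pvFilter : List Char → Bool → Bool → List Char × Bool
  | [], ins, _ => ([], ins)
  | c :: rest, ins, esc =>
    if esc then pvFilter rest ins false
    else if c = '\\' then pvFilter rest ins true
    else if c = '"' then pvFilter rest (!ins) esc
    else if !ins && (c = '{' ∨ c = '[' ∨ c = '}' ∨ c = ']') then
      let p := pvFilter rest ins esc
      (c :: p.1, p.2)
    else pvFilter rest ins esc

-- Pass 2: stack matcher over the bracket list; none = mismatch.
def pvMatch : List Char → List Char → Option (List Char)
  | [], stack => some stack
  | b :: rest, stack =>
    if b = '{' ∨ b = '[' then pvMatch rest (b :: stack)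
    else
      match stack with
      | [] => none
      | t :: stack' =>
        if t = (if b = '}' then '{' else '[') then pvMatch rest stack' else none

def looks_incomplete_py_alt (buffer : String) : Bool :=
  let p := pvFilter buffer.toList false false
  match pvMatch p.1 [] with
  | none => false
  | some st => p.2 || !st.isEmpty

-- ===== PRECONDITION & SPEC =====
def Spec_looks_incomplete_py (buffer : String) (out : Bool) : Prop := out = looks_incomplete_py_alt buffer
instance (buffer : String) (out : Bool) : Decidable (Spec_looks_incomplete_py buffer out) := by unfold Spec_looks_incomplete_py; infer_instance

-- ===== CLAIM (what is proved, stated in full; the proofs are below) =====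
def Claim_equal_looks_incomplete_py : Prop := ∀ (buffer : String), Dom_looks_incomplete_py buffer → Spec_looks_incomplete_py buffer (looks_incomplete_py buffer)

-- ===== LEMMAS AND PROOFS =====

-- ===== VERDICT (by name: the statement is the Claim_ definition above) =====
-- The two-phase B equals the merged loop A, for every starting state.
theorem pvLoop_eq (l : List Char) : ∀ (stack : List Char) (ins esc : Bool),
    pvALoop l stack ins esc =
      (match pvMatch (pvFilter l ins esc).1 stack with
       | none => false
       | some st => (pvFilter l ins esc).2 || !st.isEmpty) := by
  induction l with
  | nil => intro stack ins esc; simp [pvALoop, pvFilter, pvMatch]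
  | cons c rest ih =>
    intro stack ins esc
    by_cases he : esc = true
    · simp [pvALoop, pvFilter, he, ih]
    · simp only [Bool.not_eq_true] at he
      subst he
      by_cases hb : c = '\\'
      · simp [pvALoop, pvFilter, hb, ih]
      · by_cases hq : c = '"'
        · simp [pvALoop, pvFilter, hq, ih]
        · by_cases hi : ins = true
          · simp [pvALoop, pvFilter, hb, hq, hi, ih]
          · simp only [Bool.not_eq_true] at hi
            subst hi
            by_cases ho : c = '{' ∨ c = '['
            · rcases ho with h | h <;> subst h <;>
                simp [pvALoop, pvFilter, pvMatch, ih]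
            · by_cases hc : c = '}'
              · subst hc
                cases stack with
                | nil => simp [pvALoop, pvFilter, pvMatch]
                | cons t stack' =>
                  by_cases ht : t = '{'
                  · simp [pvALoop, pvFilter, pvMatch, ht, ih]
                  · simp [pvALoop, pvFilter, pvMatch, ht]
              · by_cases hd : c = ']'
                · subst hd
                  cases stack with
                  | nil => simp [pvALoop, pvFilter, pvMatch]
                  | cons t stack' =>
                    by_cases ht : t = '['
                    · simp [pvALoop, pvFilter, pvMatch, ht, ih]
                    · simp [pvALoop, pvFilter, pvMatch, ht]
                · simp [pvALoop, pvFilter, hb, hq, hc, hd, ho, ih]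

theorem looks_incomplete_py_spec : Claim_equal_looks_incomplete_py := by
  intro buffer _
  unfold Spec_looks_incomplete_py looks_incomplete_py looks_incomplete_py_alt
  exact pvLoop_eq buffer.toList [] false false
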